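-- pv_equiv track=rewrite | github.com/litufu/companyValue | utils/english_abb.py | english_to_abb
-- ===== SOURCE A (Python) =====
-- def english_to_abb(origin_words):
--     '''
--
--     :param origin_words: 输入的原始单词
--     :return: 返回的英语缩写，用于字段或变量名称
--     '''
--     del_letter = ['a','e','i','o','u',"'"]
--     alter_letter = ['-',':','&']
--     words = origin_words.split(' ')
--     #去除在del_letter中的字符,将alter_letter中的字符替换成下划线
--     new_words = []
--     for word in words:
--         new_word = [word[0].lower(),]
--         for letter in word[1:len(word)]:
--             if letter not in del_letter:
--                 if letter in alter_letter:
--                     letter = '_'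
--                 new_word.append(letter)
--
--         #去除响铃重复字母
--         new_word2 = []
--         for i in range(0,len(new_word)-1):
--             if new_word[i] == new_word[i+1]:
--                 pass
--             else:
--                 new_word2.append((new_word[i]))
--         new_word2.append(new_word[len(new_word)-1])
--
--         word = ''.join(new_word2)
--         new_words.append(word)
--     newwords = '_'.join(new_words)
--
--     return newwords
-- ===== SOURCE B (Python) =====
-- def english_to_abb(origin_words):
--     # Single streaming pass per word: filtering, separator mapping and
--     # run-collapsing fused into one loop, no intermediate lists.
--     pieces = []
--     for word in origin_words.split(' '):
--         last = word[0].lower()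
--         out = last
--         for ch in word[1:]:
--             if ch in "aeiou'":
--                 continue
--             if ch in '-:&':
--                 ch = '_'
--             if ch != last:
--                 out += ch
--                 last = ch
--         pieces.append(out)
--     return '_'.join(pieces)
-- ===== Notes on version B (the rewrite author's own statement) =====
-- stated objective: simpler
-- what changed: Per word, A builds an intermediate filtered list and then collapses adjacent duplicates in a second index-based pass; B fuses filtering, separator mapping and run-collapsing into one streaming pass that tracks only the last emitted character.
import Mathlib
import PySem

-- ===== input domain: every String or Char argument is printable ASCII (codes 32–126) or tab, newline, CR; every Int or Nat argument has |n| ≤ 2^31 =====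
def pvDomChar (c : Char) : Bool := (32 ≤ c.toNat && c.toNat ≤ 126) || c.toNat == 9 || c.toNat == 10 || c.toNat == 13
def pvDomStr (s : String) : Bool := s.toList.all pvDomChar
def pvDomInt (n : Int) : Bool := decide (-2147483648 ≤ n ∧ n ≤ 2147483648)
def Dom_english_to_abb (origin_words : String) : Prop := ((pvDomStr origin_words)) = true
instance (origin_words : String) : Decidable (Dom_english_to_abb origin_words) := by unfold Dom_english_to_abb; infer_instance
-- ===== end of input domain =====

-- B fuses A's two per-word passes (filter/map, then adjacent-duplicate collapse over an
-- intermediate list) into one streaming pass tracking only the last emitted character (objective: simpler).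


-- ===== PORT A =====
-- del_letter / alter_letter of A
def pvDelA : List Char := ['a','e','i','o','u','\'']
def pvAltA : List Char := ['-',':','&']

-- A's per-word body: build new_word (filter/replace loop), then the index loop over
-- range(0, len-1) collapsing adjacent duplicates into new_word2, then append the last element.
-- On the empty word Python raises IndexError at word[0]; excluded by Pre_, we return [].
-- Indices of the range loop are always in range, so list.getD is exact there.
def pvAWord (w : List Char) : List Char :=
  match w with
  | [] => []
  | c :: rest =>
    let new_word := rest.foldl (fun acc letter =>
        if letter ∈ pvDelA then acc
        else acc ++ [if letter ∈ pvAltA then '_' else letter])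
      [PySem.Chars.lowerChar c]
    let new_word2 := (List.range (new_word.length - 1)).foldl (fun acc i =>
        if new_word.getD i ' ' = new_word.getD (i + 1) ' ' then acc
        else acc ++ [new_word.getD i ' ']) []
    new_word2 ++ [new_word.getD (new_word.length - 1) ' ']

def english_to_abb (origin_words : String) : String :=
  String.mk (PySem.Chars.join ['_'] ((PySem.Chars.splitOn origin_words.toList [' ']).map pvAWord))

-- ===== PORT B =====
-- B's streaming loop: skip vowels/apostrophe, map separators to '_', emit only if ≠ last.
def pvBGo (last : Char) (cs : List Char) : List Char :=
  match cs with
  | [] => []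
  | ch :: rest =>
    if ch ∈ ['a','e','i','o','u','\''] then pvBGo last rest
    else
      let m := if ch ∈ ['-',':','&'] then '_' else ch
      if m = last then pvBGo last rest else m :: pvBGo m rest

-- B's per-word body (Source B raises IndexError on the empty word too; excluded by Pre_).
def pvBWord (w : List Char) : List Char :=
  match w with
  | [] => []
  | c :: rest =>
    let c0 := PySem.Chars.lowerChar c
    c0 :: pvBGo c0 rest

def english_to_abb_alt (origin_words : String) : String :=
  String.mk (PySem.Chars.join ['_'] ((PySem.Chars.splitOn origin_words.toList [' ']).map pvBWord))

-- ===== PRECONDITION & SPEC =====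
-- Both Pythons raise IndexError (indexing the first character of an empty word) whenever the
-- space-split yields an empty piece; Pre_ excludes exactly those inputs.
def Pre_english_to_abb (origin_words : String) : Prop :=
  ∀ w ∈ PySem.Chars.splitOn origin_words.toList [' '], w ≠ []
instance (origin_words : String) : Decidable (Pre_english_to_abb origin_words) := by
  unfold Pre_english_to_abb; infer_instance

def pvWitness_english_to_abb : String := "Hello World"

def Spec_english_to_abb (origin_words : String) (out : String) : Prop := out = english_to_abb_alt origin_words
instance (origin_words : String) (out : String) : Decidable (Spec_english_to_abb origin_words out) := by unfold Spec_english_to_abb; infer_instance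

-- ===== CLAIM (what is proved, stated in full; the proofs are below) =====
def Claim_equal_english_to_abb : Prop := ∀ (origin_words : String), Dom_english_to_abb origin_words → Pre_english_to_abb origin_words → Spec_english_to_abb origin_words (english_to_abb origin_words)

-- ===== LEMMAS AND PROOFS =====

-- the filtered/replaced tail as a recursive list (what A's first loop builds)
def pvFM (cs : List Char) : List Char :=
  match cs with
  | [] => []
  | x :: xs =>
    if x ∈ pvDelA then pvFM xs
    else (if x ∈ pvAltA then '_' else x) :: pvFM xs

theorem pvFM_foldl (cs : List Char) (acc : List Char) :
    cs.foldl (fun acc letter =>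
        if letter ∈ pvDelA then acc
        else acc ++ [if letter ∈ pvAltA then '_' else letter]) acc
      = acc ++ pvFM cs := by
  induction cs generalizing acc with
  | nil => simp [pvFM]
  | cons x xs ih =>
    simp only [List.foldl_cons, pvFM]
    by_cases h : x ∈ pvDelA
    · simp [h, ih]
    · simp [h, ih]

-- the elements A's index loop keeps (l[i] for i < len-1 with l[i] ≠ l[i+1])
def pvPK (l : List Char) : List Char :=
  match l with
  | [] => []
  | [_] => []
  | x :: y :: r => (if x = y then [] else [x]) ++ pvPK (y :: r)

theorem pvRangeFold (l : List Char) (acc : List Char) :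
    (List.range (l.length - 1)).foldl (fun acc i =>
        if l.getD i ' ' = l.getD (i + 1) ' ' then acc
        else acc ++ [l.getD i ' ']) acc = acc ++ pvPK l := by
  induction l generalizing acc with
  | nil => simp [pvPK]
  | cons x t ih =>
    cases t with
    | nil => simp [pvPK]
    | cons y r =>
      have hr : (x :: y :: r).length - 1 = r.length + 1 := by simp
      rw [hr, List.range_succ_eq_map, List.foldl_cons, List.foldl_map]
      have hlen : r.length = (y :: r).length - 1 := by simp
      calc (List.range r.length).foldl (fun a i =>
              if (x :: y :: r).getD (i + 1) ' ' = (x :: y :: r).getD (i + 1 + 1) ' ' then a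
              else a ++ [(x :: y :: r).getD (i + 1) ' '])
            (if (x :: y :: r).getD 0 ' ' = (x :: y :: r).getD 1 ' ' then acc else acc ++ [x])
          = (List.range ((y :: r).length - 1)).foldl (fun a i =>
              if (y :: r).getD i ' ' = (y :: r).getD (i + 1) ' ' then a
              else a ++ [(y :: r).getD i ' '])
            (if x = y then acc else acc ++ [x]) := by
            rw [hlen]
            congr 1
        _ = (if x = y then acc else acc ++ [x]) ++ pvPK (y :: r) := ih _
        _ = acc ++ pvPK (x :: y :: r) := by
            by_cases h : x = y <;> simp [pvPK, h]

-- A's collapse as a structural recursion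
def pvCA (l : List Char) : List Char :=
  match l with
  | [] => []
  | [x] => [x]
  | x :: y :: r => if x = y then pvCA (y :: r) else x :: pvCA (y :: r)

theorem pvCA_eq_pk_last (l : List Char) (h : l ≠ []) :
    pvCA l = pvPK l ++ [l.getD (l.length - 1) ' '] := by
  induction l with
  | nil => exact absurd rfl h
  | cons x t ih =>
    cases t with
    | nil => simp [pvCA, pvPK]
    | cons y r =>
      have ih' := ih (by simp)
      have hlast : (x :: y :: r).getD ((x :: y :: r).length - 1) ' '
          = (y :: r).getD ((y :: r).length - 1) ' ' := by
        simp only [List.length_cons, Nat.add_sub_cancel, List.getD_cons_succ]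
      by_cases h' : x = y <;> simp [pvCA, pvPK, h', ih'] <;> rfl

-- pure streaming dedup (B's loop, filtering already done)
def pvGoS (last : Char) (cs : List Char) : List Char :=
  match cs with
  | [] => []
  | c :: r => if c = last then pvGoS last r else c :: pvGoS c r

theorem pvCA_cons (x : Char) (xs : List Char) : pvCA (x :: xs) = x :: pvGoS x xs := by
  induction xs generalizing x with
  | nil => simp [pvCA, pvGoS]
  | cons y r ih =>
    by_cases h : x = y
    · subst h; simp [pvCA, pvGoS, ih]
    · simp [pvCA, pvGoS, h, Ne.symm h, ih]

theorem pvBGo_eq (cs : List Char) (last : Char) : pvBGo last cs = pvGoS last (pvFM cs) := by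
  induction cs generalizing last with
  | nil => simp [pvBGo, pvFM, pvGoS]
  | cons x xs ih =>
    show pvBGo last (x :: xs) = pvGoS last (pvFM (x :: xs))
    rw [pvBGo, pvFM]
    by_cases hd : x ∈ pvDelA
    · have : x ∈ ['a','e','i','o','u','\''] := hd
      simp only [this, if_true, hd, if_true, ih]
    · have hd' : x ∉ ['a','e','i','o','u','\''] := hd
      have halt : (if x ∈ ['-',':','&'] then '_' else x) = (if x ∈ pvAltA then '_' else x) := by
        rfl
      simp only [hd', if_false, hd, if_false, halt, pvGoS]
      by_cases he : (if x ∈ pvAltA then '_' else x) = last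
      · simp [he, ih]
      · simp [he, ih]

theorem pvWord_eq (w : List Char) : pvAWord w = pvBWord w := by
  cases w with
  | nil => rfl
  | cons c rest =>
    show pvAWord (c :: rest) = pvBWord (c :: rest)
    rw [pvAWord, pvBWord]
    simp only [pvFM_foldl]
    rw [pvRangeFold]
    rw [List.nil_append, List.singleton_append]
    rw [← pvCA_eq_pk_last (PySem.Chars.lowerChar c :: pvFM rest) (by simp)]
    rw [pvCA_cons, pvBGo_eq]

-- ===== VERDICT (by name: the statement is the Claim_ definition above) =====
theorem english_to_abb_spec : Claim_equal_english_to_abb := by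
  intro s _ _
  unfold Spec_english_to_abb english_to_abb english_to_abb_alt
  rw [funext pvWord_eq]
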